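-- pv_equiv track=rewrite | github.com/mitus66/python-tasks-QALight | hw14.py | jumps_count
-- ===== SOURCE A (Python) =====
-- def jumps_count(array):
--   jumps = 0      # кількість стрибків
--   position = 0   # поточне положення жаби
--   visited_position = set() # відвідані позиції
--
--   while 0 <= position < len(array):
--     if position in visited_position:
--       return -1
--     visited_position.add(position)
--     position += array[position]
--     jumps += 1
--
--   return jumps
-- ===== SOURCE B (Python) =====
-- def jumps_count(array):
--   # Bounded for-loop: by pigeonhole, a frog still in bounds after len(array)
--   # jumps must have revisited a position, so falling off the range means a cycle.
--   n = len(array)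
--   position = 0
--   for jumps in range(n + 1):
--     if not (0 <= position < n):
--       return jumps
--     position += array[position]
--   return -1
-- ===== Notes on version B (the rewrite author's own statement) =====
-- stated objective: simpler
-- what changed: Drops the visited set and the jumps accumulator: B is a bounded for-loop over range(len(array)+1) carrying only the position, returning the loop index when the frog leaves the array and -1 on fall-through, since by pigeonhole len(array) in-bounds jumps imply a revisited position.
import Mathlib
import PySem

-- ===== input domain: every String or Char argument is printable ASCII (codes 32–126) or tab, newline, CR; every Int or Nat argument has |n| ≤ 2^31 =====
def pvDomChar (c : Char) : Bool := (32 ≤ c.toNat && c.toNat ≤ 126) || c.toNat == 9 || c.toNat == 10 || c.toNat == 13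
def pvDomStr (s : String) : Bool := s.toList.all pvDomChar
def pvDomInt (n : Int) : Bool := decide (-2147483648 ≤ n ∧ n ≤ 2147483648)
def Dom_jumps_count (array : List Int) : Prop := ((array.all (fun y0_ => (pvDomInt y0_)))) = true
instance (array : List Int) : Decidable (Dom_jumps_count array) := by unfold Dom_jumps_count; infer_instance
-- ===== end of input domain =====

-- B drops A's visited set and jumps accumulator: a bounded for-loop over range(len(array)+1)
-- carrying only the position (pigeonhole detects the cycle); simpler, O(1) extra space.

-- ===== PORT A =====
-- fuel (array.length + 1) only makes the while-loop total: the visited set gains one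
-- element per iteration, so at most array.length + 1 iterations happen (proved below).
def jumpsLoopA (array : List Int) : Nat → Int → Int → PySem.Set Int → Int
  | 0, jumps, _, _ => jumps
  | fuel + 1, jumps, position, visited =>
    if 0 ≤ position ∧ position < (array.length : Int) then
      if PySem.Set.contains visited position then -1
      else jumpsLoopA array fuel (jumps + 1)
             (position + PySem.List.pyGetD array position 0)
             (PySem.Set.add visited position)
    else jumps

def jumps_count (array : List Int) : Int :=
  jumpsLoopA array (array.length + 1) 0 0 PySem.Set.empty

-- ===== PORT B =====
-- 'for jumps in range(n + 1): …' = structural recursion over the range list; the early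
-- 'return jumps' is the cons branch's first arm, the fall-through 'return -1' is the nil case.
def forB (array : List Int) : Int → List Int → Int
  | _, [] => -1
  | position, jumps :: rest =>
    if ¬ (0 ≤ position ∧ position < (array.length : Int)) then jumps
    else forB array (position + PySem.List.pyGetD array position 0) rest

def jumps_count_alt (array : List Int) : Int :=
  forB array 0 (PySem.List.pyRange 0 ((array.length : Int) + 1) 1)

-- ===== PRECONDITION & SPEC =====
def Spec_jumps_count (array : List Int) (out : Int) : Prop := out = jumps_count_alt array
instance (array : List Int) (out : Int) : Decidable (Spec_jumps_count array out) := by unfold Spec_jumps_count; infer_instance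

-- ===== CLAIM (what is proved, stated in full; the proofs are below) =====
def Claim_equal_jumps_count : Prop := ∀ (array : List Int), Dom_jumps_count array → Spec_jumps_count array (jumps_count array)

-- ===== LEMMAS AND PROOFS =====

-- the frog's position after k jumps
def frogStep (array : List Int) (p : Int) : Int := p + PySem.List.pyGetD array p 0
def frogTraj (array : List Int) (k : Nat) : Int := (frogStep array)^[k] (0 : Int)

theorem frogTraj_succ (array : List Int) (k : Nat) :
    frogTraj array (k + 1) = frogStep array (frogTraj array k) := by
  unfold frogTraj
  rw [Function.iterate_succ_apply']

-- positions in bounds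
def frogInb (array : List Int) (p : Int) : Prop := 0 ≤ p ∧ p < (array.length : Int)

-- pigeonhole: an in-bounds, repetition-free trajectory prefix has length ≤ array.length
theorem frog_inj_bound (array : List Int) (m : Nat)
    (hinb : ∀ i < m, frogInb array (frogTraj array i))
    (hinj : ∀ i i', i < i' → i' < m → frogTraj array i ≠ frogTraj array i') :
    m ≤ array.length := by
  have h := Finset.card_le_card_of_injOn (f := fun i => frogTraj array i)
    (s := Finset.range m) (t := Finset.Ico (0 : Int) (array.length : Int))
    (by
      intro i hi
      simp only [Finset.mem_coe, Finset.mem_range] at hi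
      have h2 : 0 ≤ frogTraj array i ∧ frogTraj array i < (array.length : Int) := hinb i hi
      simp only [Finset.coe_Ico, Set.mem_Ico]
      exact h2)
    (by
      intro i hi j hj hij
      simp only [Finset.mem_coe, Finset.mem_range] at hi hj
      by_contra hne
      rcases Nat.lt_or_ge i j with h1 | h1
      · exact hinj i j h1 hj hij
      · have h2 : j < i := lt_of_le_of_ne h1 (fun h => hne h.symm)
        exact hinj j i h2 hi hij.symm)
  simpa [Int.card_Ico] using h

-- a repeat makes the trajectory forever trapped among its first j values
theorem frog_periodic (array : List Int) (i j : Nat) (hij : i < j)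
    (hrep : frogTraj array i = frogTraj array j) (k : Nat) :
    ∃ m < j, frogTraj array k = frogTraj array m := by
  induction k with
  | zero => exact ⟨0, Nat.lt_of_le_of_lt (Nat.zero_le i) hij, rfl⟩
  | succ k ih =>
    obtain ⟨m, hm, heq⟩ := ih
    rcases Nat.lt_or_ge (m + 1) j with h1 | h1
    · exact ⟨m + 1, h1, by rw [frogTraj_succ, heq, ← frogTraj_succ]⟩
    · have hmj : m + 1 = j := by omega
      refine ⟨i, hij, ?_⟩
      rw [frogTraj_succ, heq, ← frogTraj_succ, hmj, ← hrep]

theorem pyRange_one_nil (a b : Int) (h : b ≤ a) : PySem.List.pyRange a b 1 = [] := by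
  rw [PySem.List.pyRange_one]
  have : (b - a).toNat = 0 := by omega
  simp [this]

-- B returns -1 when the trajectory never leaves the array
theorem forB_trapped (array : List Int) (fuel j : Nat)
    (hfuel : fuel = array.length + 1 - j) (hj : j ≤ array.length + 1)
    (hall : ∀ k, frogInb array (frogTraj array k)) :
    forB array (frogTraj array j) (PySem.List.pyRange (j : Int) ((array.length : Int) + 1) 1) = -1 := by
  induction fuel generalizing j with
  | zero =>
    have hje : j = array.length + 1 := by omega
    rw [pyRange_one_nil _ _ (by omega), forB]
  | succ fuel ih =>
    by_cases hlt : j < array.length + 1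
    · rw [PySem.List.pyRange_one_cons (by exact_mod_cast hlt)]
      have hin' : 0 ≤ frogTraj array j ∧ frogTraj array j < (array.length : Int) := hall j
      rw [forB, if_neg (by exact fun h => h hin')]
      have hc : ((j : Int) + 1) = ((j + 1 : Nat) : Int) := by push_cast; ring
      rw [hc, ← frogStep, ← frogTraj_succ]
      exact ih (j + 1) (by omega) (by omega)
    · rw [pyRange_one_nil _ _ (by omega), forB]

-- B returns K when the trajectory first leaves the array at step K ≤ array.length
theorem forB_exit (array : List Int) (fuel j K : Nat)
    (hfuel : fuel = array.length + 1 - j) (hjK : j ≤ K) (hK : K ≤ array.length)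
    (hmid : ∀ i, j ≤ i → i < K → frogInb array (frogTraj array i))
    (hout : ¬ frogInb array (frogTraj array K)) :
    forB array (frogTraj array j) (PySem.List.pyRange (j : Int) ((array.length : Int) + 1) 1) = (K : Int) := by
  induction fuel generalizing j with
  | zero => omega
  | succ fuel ih =>
    have hlt : (j : Int) < (array.length : Int) + 1 := by exact_mod_cast (by omega : j < array.length + 1)
    rw [PySem.List.pyRange_one_cons hlt]
    rcases Nat.eq_or_lt_of_le hjK with heq | hlt2
    · subst heq
      rw [forB, if_pos (by exact fun h => hout h)]
    · have hin' : 0 ≤ frogTraj array j ∧ frogTraj array j < (array.length : Int) := hmid j le_rfl hlt2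
      rw [forB, if_neg (by exact fun h => h hin')]
      have hc : ((j : Int) + 1) = ((j + 1 : Nat) : Int) := by push_cast; ring
      rw [hc, ← frogStep, ← frogTraj_succ]
      exact ih (j + 1) (by omega) hlt2 (fun i h1 h2 => hmid i (by omega) h2)

-- A's loop, under its invariant, computes exactly B's overall result
theorem loopA_eq_alt (array : List Int) (fuel j : Nat) (visited : PySem.Set Int)
    (hfuel : fuel = array.length + 1 - j)
    (hvis : ∀ p, p ∈ visited ↔ ∃ i < j, frogTraj array i = p)
    (hinb : ∀ i < j, frogInb array (frogTraj array i))
    (hinj : ∀ i i', i < i' → i' < j → frogTraj array i ≠ frogTraj array i') :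
    jumpsLoopA array fuel (j : Int) (frogTraj array j) visited = jumps_count_alt array := by
  have hjn : j ≤ array.length := frog_inj_bound array j hinb hinj
  induction fuel generalizing j visited with
  | zero => omega
  | succ fuel ih =>
    by_cases hin : frogInb array (frogTraj array j)
    · have hin' : 0 ≤ frogTraj array j ∧ frogTraj array j < (array.length : Int) := hin
      rw [jumpsLoopA, if_pos hin']
      by_cases hmem : frogTraj array j ∈ visited
      · have hc : PySem.Set.contains visited (frogTraj array j) = true := by
          rw [PySem.Set.contains_iff]; exact hmem
        rw [if_pos hc]
        obtain ⟨i, hi, hieq⟩ := (hvis _).mp hmem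
        have hall : ∀ k, frogInb array (frogTraj array k) := by
          intro k
          obtain ⟨m, hm, hmeq⟩ := frog_periodic array i j hi hieq k
          rw [hmeq]
          rcases Nat.lt_or_ge m j with h | h
          · exact hinb m h
          · omega
        have h0 := forB_trapped array (array.length + 1) 0 (by omega) (by omega) hall
        unfold jumps_count_alt
        simpa [frogTraj] using h0.symm
      · have hc : ¬ PySem.Set.contains visited (frogTraj array j) = true := by
          rw [PySem.Set.contains_iff]; exact hmem
        rw [if_neg hc]
        have hinb' : ∀ i < j + 1, frogInb array (frogTraj array i) := by
          intro i hi
          rcases Nat.lt_or_ge i j with h | h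
          · exact hinb i h
          · have : i = j := by omega
            rw [this]; exact hin
        have hinj' : ∀ i i', i < i' → i' < j + 1 → frogTraj array i ≠ frogTraj array i' := by
          intro i i' h1 h2 heq
          rcases Nat.lt_or_ge i' j with h | h
          · exact hinj i i' h1 h heq
          · have hi'j : i' = j := by omega
            subst hi'j
            exact hmem ((hvis _).mpr ⟨i, h1, heq⟩)
        have hjn' : j + 1 ≤ array.length := frog_inj_bound array (j + 1) hinb' hinj'
        have hc2 : ((j : Int) + 1) = ((j + 1 : Nat) : Int) := by push_cast; ring
        rw [hc2, ← frogStep, ← frogTraj_succ]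
        refine ih (j + 1) (PySem.Set.add visited (frogTraj array j)) (by omega) ?_ hinb' hinj' (by omega)
        intro p
        rw [PySem.Set.mem_add]
        constructor
        · rintro (h | h)
          · obtain ⟨i, hi, hieq⟩ := (hvis p).mp h
            exact ⟨i, by omega, hieq⟩
          · exact ⟨j, by omega, h.symm⟩
        · rintro ⟨i, hi, hieq⟩
          rcases Nat.lt_or_ge i j with h | h
          · exact Or.inl ((hvis p).mpr ⟨i, h, hieq⟩)
          · have : i = j := by omega
            subst this
            exact Or.inr hieq.symm
    · have hin' : ¬ (0 ≤ frogTraj array j ∧ frogTraj array j < (array.length : Int)) := hin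
      rw [jumpsLoopA, if_neg hin']
      have h0 := forB_exit array (array.length + 1) 0 j (by omega) (by omega) hjn
        (fun i _ h2 => hinb i h2) hin
      unfold jumps_count_alt
      simpa [frogTraj] using h0.symm

-- ===== VERDICT (by name: the statement is the Claim_ definition above) =====
theorem jumps_count_spec : Claim_equal_jumps_count := by
  intro array _
  unfold Spec_jumps_count jumps_count
  have h := loopA_eq_alt array (array.length + 1) 0 PySem.Set.empty (by omega)
    (by intro p; simp [PySem.Set.empty]) (by omega) (by omega)
  simpa [frogTraj] using h
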